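-- pv_equiv track=rewrite | github.com/sumajirou/ProjectEuler | p719.py | f
-- ===== SOURCE A (Python) =====
-- def f(buf):
--   def f1(patterns, last):
--     return [ptn[:-1] + [ptn[-1]+last] for ptn in patterns]
--   def f2(patterns, last):
--     return [ptn + [last] for ptn in patterns]
--
--   if len(buf) <= 1:
--     return [[buf]]
--   init = f(buf[:-1])
--   last = buf[-1]
--   return f1(init,last) + f2(init,last)
-- ===== SOURCE B (Python) =====
-- def f(buf):
--     # Enumerate contiguous partitions iteratively: each bit i of a mask marks a
--     # cut after position i; ascending mask order enumerates all partitions.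
--     if len(buf) <= 1:
--         return [[buf]]
--     n = len(buf)
--     res = []
--     for mask in range(1 << (n - 1)):
--         parts = []
--         start = 0
--         for i in range(n - 1):
--             if mask & (1 << i):
--                 parts.append(buf[start:i + 1])
--                 start = i + 1
--         parts.append(buf[start:n])
--         res.append(parts)
--     return res
-- ===== Notes on version B (the rewrite author's own statement) =====
-- stated objective: alternative
-- what changed: Replaces the recursion on the string's last character by a direct iterative enumeration: each bitmask below 2^(n-1) encodes the set of cut positions, and the partitions are emitted in ascending mask order, which coincides with A's merge-before-split order.
import Mathlib
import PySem

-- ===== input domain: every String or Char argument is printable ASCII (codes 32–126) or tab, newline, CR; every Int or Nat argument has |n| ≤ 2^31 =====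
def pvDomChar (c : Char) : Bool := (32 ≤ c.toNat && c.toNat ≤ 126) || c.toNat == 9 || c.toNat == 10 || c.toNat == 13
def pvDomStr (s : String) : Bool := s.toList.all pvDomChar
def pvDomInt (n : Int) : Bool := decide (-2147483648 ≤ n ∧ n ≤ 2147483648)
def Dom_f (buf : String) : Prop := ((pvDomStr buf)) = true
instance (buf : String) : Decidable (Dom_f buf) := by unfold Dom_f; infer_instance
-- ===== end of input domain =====

-- B enumerates the contiguous partitions by bitmask instead of A's recursion on the last
-- character; both ports manipulate the string as its character list and convert to String
-- at the very end.

-- ===== PORT A =====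
-- A's recursion: f(buf[:-1]) first, then merge the last char into the last part (f1),
-- then append it as a new part (f2).
def fCore (l : List Char) : List (List (List Char)) :=
  if l.length ≤ 1 then [[l]]
  else
    let init := fCore l.dropLast
    let last := [l.getLast!]
    (init.map fun ptn => ptn.dropLast ++ [ptn.getLast! ++ last]) ++
      (init.map fun ptn => ptn ++ [last])
termination_by l.length
decreasing_by simp [List.length_dropLast]; omega

def f (buf : String) : List (List String) :=
  (fCore buf.toList).map (fun p => p.map String.ofList)

-- ===== PORT B =====
-- buf[a:b] for 0 ≤ a ≤ b ≤ len(buf) (the only way B uses slicing); exact on that range.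
def sliceB (l : List Char) (a b : Nat) : List Char := (l.drop a).take (b - a)

-- one step of B's inner loop: if bit i of mask is set, cut after position i
def stepB (l : List Char) (mask : Nat) (acc : List (List Char) × Nat) (i : Nat) :
    List (List Char) × Nat :=
  if mask &&& (1 <<< i) ≠ 0 then (acc.1 ++ [sliceB l acc.2 (i + 1)], i + 1) else acc

-- the partition of l (of length n) described by mask
def partsB (l : List Char) (n mask : Nat) : List (List Char) :=
  let st := (List.range (n - 1)).foldl (stepB l mask) ([], 0)
  st.1 ++ [sliceB l st.2 n]

def altCore (l : List Char) : List (List (List Char)) :=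
  if l.length ≤ 1 then [[l]]
  else (List.range (1 <<< (l.length - 1))).map (partsB l l.length)

def f_alt (buf : String) : List (List String) :=
  (altCore buf.toList).map (fun p => p.map String.ofList)

-- ===== PRECONDITION & SPEC =====
def Spec_f (buf : String) (out : List (List String)) : Prop := out = f_alt buf
instance (buf : String) (out : List (List String)) : Decidable (Spec_f buf out) := by
  unfold Spec_f; infer_instance

-- ===== CLAIM (what is proved, stated in full; the proofs are below) =====
def Claim_equal_f : Prop := ∀ (buf : String), Dom_f buf → Spec_f buf (f buf)

-- ===== LEMMAS AND PROOFS =====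

theorem getLast!_concat' {α : Type} [Inhabited α] (l : List α) (a : α) :
    (l ++ [a]).getLast! = a := by
  simp [List.getLast!_eq_getLast?_getD]

-- bit test of B's loop as Nat.testBit
theorem bit_test (m i : Nat) : (m &&& (1 <<< i) ≠ 0) ↔ m.testBit i = true := by
  simp [Nat.testBit, Nat.one_shiftLeft, Nat.and_two_pow]

-- a slice strictly inside l' is unchanged when a character is appended to l'
theorem sliceB_append (l' : List Char) (c : Char) (a b : Nat) (hb : b ≤ l'.length) :
    sliceB (l' ++ [c]) a b = sliceB l' a b := by
  unfold sliceB
  by_cases ha : a ≤ l'.length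
  · rw [List.drop_append, List.take_append]
    have h1 : a - l'.length = 0 := by omega
    have h2 : b - a - (l'.length - a) = 0 := by omega
    simp [h1, h2]
  · have h1 : l'.drop a = [] := by simp; omega
    rw [List.drop_append, h1]
    have h2 : b - a = 0 := by omega
    simp [h2]

-- the fold over the first j loop steps agrees between l'++[c] and l', for masks with the
-- same low bits, and keeps its cut position ≤ j
theorem foldB_congr (l' : List Char) (c : Char) (mask mask' : Nat) (j : Nat)
    (hj : j ≤ l'.length)
    (hbits : ∀ i, i < j → (mask'.testBit i = mask.testBit i)) :
    (List.range j).foldl (stepB (l' ++ [c]) mask') ([], 0)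
      = (List.range j).foldl (stepB l' mask) ([], 0)
    ∧ ((List.range j).foldl (stepB l' mask) ([], 0)).2 ≤ j := by
  induction j with
  | zero => simp
  | succ j ih =>
    obtain ⟨heq, hle⟩ := ih (by omega) (fun i hi => hbits i (by omega))
    rw [List.range_succ, List.foldl_append, List.foldl_append, heq]
    set s := (List.range j).foldl (stepB l' mask) ([], 0) with hs
    simp only [List.foldl_cons, List.foldl_nil]
    unfold stepB
    have hc : (mask' &&& 1 <<< j ≠ 0) ↔ (mask &&& 1 <<< j ≠ 0) := by
      rw [bit_test, bit_test, hbits j (by omega)]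
    by_cases hb : mask &&& 1 <<< j ≠ 0
    · rw [if_pos hb, if_pos (hc.mpr hb), sliceB_append l' c s.2 (j + 1) (by omega)]
      exact ⟨rfl, by omega⟩
    · rw [if_neg hb, if_neg (fun h => hb (hc.mp h))]
      exact ⟨rfl, by omega⟩

-- mask without its top bit: B's partition of l'++[c] is A's f1 of B's partition of l'
theorem partsB_low (l' : List Char) (c : Char) (mask : Nat) (hl : 1 ≤ l'.length)
    (hm : mask < 2 ^ (l'.length - 1)) :
    partsB (l' ++ [c]) (l'.length + 1) mask
      = (partsB l' l'.length mask).dropLast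
          ++ [(partsB l' l'.length mask).getLast! ++ [c]] := by
  obtain ⟨heq, hle⟩ := foldB_congr l' c mask mask (l'.length - 1) (by omega) (fun _ _ => rfl)
  unfold partsB
  have hrange : l'.length + 1 - 1 = (l'.length - 1) + 1 := by omega
  rw [hrange, List.range_succ, List.foldl_append, heq]
  set s := (List.range (l'.length - 1)).foldl (stepB l' mask) ([], 0) with hs
  simp only [List.foldl_cons, List.foldl_nil]
  unfold stepB
  have hb : ¬ (mask &&& 1 <<< (l'.length - 1) ≠ 0) := by
    rw [bit_test, Nat.testBit_lt_two_pow hm]; simp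
  rw [if_neg hb]
  have hslice : sliceB (l' ++ [c]) s.2 (l'.length + 1) = sliceB l' s.2 l'.length ++ [c] := by
    unfold sliceB
    rw [List.drop_append]
    have h1 : s.2 - l'.length = 0 := by omega
    rw [h1, List.drop_zero, List.take_append]
    have h2 : l'.length + 1 - s.2 - (l'.drop s.2).length = 1 := by simp; omega
    have h3 : (l'.drop s.2).take (l'.length + 1 - s.2) = l'.drop s.2 := by
      apply List.take_of_length_le; simp; omega
    have h4 : (l'.drop s.2).take (l'.length - s.2) = l'.drop s.2 := by
      apply List.take_of_length_le; simp
    rw [h2, h3, h4]; simp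
  rw [hslice, List.dropLast_concat, getLast!_concat']

-- mask with its top bit set: B's partition of l'++[c] is A's f2 of B's partition of l'
theorem partsB_high (l' : List Char) (c : Char) (mask : Nat) (hl : 1 ≤ l'.length)
    (hm : mask < 2 ^ (l'.length - 1)) :
    partsB (l' ++ [c]) (l'.length + 1) (2 ^ (l'.length - 1) + mask)
      = partsB l' l'.length mask ++ [[c]] := by
  obtain ⟨heq, hle⟩ := foldB_congr l' c mask (2 ^ (l'.length - 1) + mask) (l'.length - 1)
    (by omega) (fun i hi => Nat.testBit_two_pow_add_gt hi mask)
  unfold partsB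
  have hrange : l'.length + 1 - 1 = (l'.length - 1) + 1 := by omega
  rw [hrange, List.range_succ, List.foldl_append, heq]
  set s := (List.range (l'.length - 1)).foldl (stepB l' mask) ([], 0) with hs
  simp only [List.foldl_cons, List.foldl_nil]
  unfold stepB
  have hb : (2 ^ (l'.length - 1) + mask) &&& 1 <<< (l'.length - 1) ≠ 0 := by
    rw [bit_test, Nat.testBit_two_pow_add_eq, Nat.testBit_lt_two_pow hm]; simp
  rw [if_pos hb]
  have h1 : l'.length - 1 + 1 = l'.length := by omega
  rw [h1]
  have hsl1 : sliceB (l' ++ [c]) s.2 l'.length = sliceB l' s.2 l'.length :=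
    sliceB_append l' c s.2 l'.length (le_refl _)
  have hsl2 : sliceB (l' ++ [c]) l'.length (l'.length + 1) = [c] := by
    unfold sliceB
    rw [List.drop_append]
    simp
  rw [hsl1, hsl2]

-- for nonempty l, altCore is the mask enumeration even at length 1
theorem altCore_pos (l : List Char) (hl : 1 ≤ l.length) :
    altCore l = (List.range (1 <<< (l.length - 1))).map (partsB l l.length) := by
  unfold altCore
  by_cases h : l.length ≤ 1
  · have h1 : l.length = 1 := by omega
    obtain ⟨a, rfl⟩ := List.length_eq_one_iff.mp h1
    simp [partsB, sliceB, List.range_succ]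
  · simp [h]

theorem core_eq (l : List Char) : fCore l = altCore l := by
  by_cases h : l.length ≤ 1
  · rw [fCore, altCore]; simp [h]
  · have hl : l ≠ [] := by intro hnil; rw [hnil] at h; simp at h
    obtain ⟨l', c, rfl⟩ := List.eq_nil_or_concat l |>.resolve_left hl
    simp only [List.concat_eq_append] at h ⊢
    have hl1 : 1 ≤ l'.length := by
      simp only [List.length_append, List.length_cons, List.length_nil] at h; omega
    have ih : fCore l' = altCore l' := core_eq l'
    rw [fCore]
    simp only [h, if_false, List.dropLast_concat, getLast!_concat']
    rw [ih, altCore_pos l' hl1,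
        altCore_pos (l' ++ [c])
          (by simp only [List.length_append, List.length_cons, List.length_nil]; omega)]
    have hlc : (l' ++ [c]).length = l'.length + 1 := by
      simp only [List.length_append, List.length_cons, List.length_nil]
    have hsplit : (1 : Nat) <<< ((l' ++ [c]).length - 1)
        = 2 ^ (l'.length - 1) + 2 ^ (l'.length - 1) := by
      rw [Nat.one_shiftLeft, hlc]
      have h2 : l'.length + 1 - 1 = (l'.length - 1) + 1 := by omega
      rw [h2, pow_succ]; omega
    rw [hsplit, List.range_add, List.map_append, List.map_map, List.map_map, List.map_map]
    simp only [Nat.one_shiftLeft, hlc]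
    congr 1
    · apply List.map_congr_left
      intro mask hmask
      rw [List.mem_range] at hmask
      simp only [Function.comp_apply]
      exact (partsB_low l' c mask hl1 hmask).symm
    · apply List.map_congr_left
      intro mask hmask
      rw [List.mem_range] at hmask
      simp only [Function.comp_apply]
      exact (partsB_high l' c mask hl1 hmask).symm
termination_by l.length
decreasing_by subst_vars; simp only [List.length_concat]; omega

-- ===== VERDICT (by name: the statement is the Claim_ definition above) =====
theorem f_spec : Claim_equal_f := by
  intro buf _
  unfold Spec_f f f_alt
  rw [core_eq]
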